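-- pv_equiv track=rewrite | github.com/jesliwang/ProjectEuler | 120/main.py | GetRMAX
-- ===== SOURCE A (Python) =====
-- def GetRMAX(num):
--     f0 = 2
--     f1 = 2 * num
--
--     found = set(tuple((f0,f1)))
--
--
--     dd = num * num
--
--     ret = f1
--     while True:
--         f3 = ( f1 * num + f0 ) % dd
--         if f3 > ret:
--             ret = f3
--
--         f0 = f1
--         f1 = f3
--
--         n = tuple((f0, f1))
--         if n in found:
--             break
--         found.add(n)
--
--     return ret
-- ===== SOURCE B (Python) =====
-- def GetRMAX(num):
--     # (num-1)**n + (num+1)**n mod num**2 is 2 for even n and (2*n*num) % num**2 for odd n;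
--     # the odd-n residues reach num*(num-1) for odd num and num*(num-2) for even num.
--     if num % 2:
--         return max(2, num * (num - 1))
--     return max(2, num * (num - 2))
-- ===== Notes on version B (the rewrite author's own statement) =====
-- stated objective: faster
-- what changed: replaces the cycle-detecting simulation of the recurrence mod num^2 by the closed form max(2, num*(num-1)) for odd num / max(2, num*(num-2)) for even num; Pre_ restricts to the problem's natural domain num >= 1 (A raises ZeroDivisionError at num = 0, and negative num are outside the natural domain of the max-remainder problem)
-- intended difference: at num = 2 A returns 4, its unreduced initial value 2*num, which is not even a remainder mod num^2 = 4; B returns 2, the true maximum of (num-1)^n + (num+1)^n mod num^2. — e.g. on GetRMAX(2): A returns 4, B returns 2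
-- outside the precondition, e.g. on GetRMAX(0): A raises ZeroDivisionError, B returns 2; on GetRMAX(-3): A returns 6, B returns 12
import Mathlib
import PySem

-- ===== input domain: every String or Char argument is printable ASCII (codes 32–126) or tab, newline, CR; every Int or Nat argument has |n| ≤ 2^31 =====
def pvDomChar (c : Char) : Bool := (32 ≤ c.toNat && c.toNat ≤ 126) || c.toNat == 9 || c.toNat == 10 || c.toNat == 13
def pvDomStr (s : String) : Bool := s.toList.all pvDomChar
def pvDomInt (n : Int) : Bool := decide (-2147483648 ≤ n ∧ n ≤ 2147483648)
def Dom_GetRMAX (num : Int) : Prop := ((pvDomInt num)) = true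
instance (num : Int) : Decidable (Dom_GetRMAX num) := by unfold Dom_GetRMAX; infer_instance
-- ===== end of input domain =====

-- B replaces A's cycle-detecting simulation of the recurrence mod num^2 by an O(1) closed form; on num = 2 (D_ below) B returns the true maximum remainder where A returns an unreduced value.

-- ===== PORT A =====
-- the `while True` loop of A; the fuel is provably larger than the number of iterations before the break
def pvLoopA (num dd : Int) : Nat → Int → Int → Std.HashSet (Int × Int) → Int → Int
  | 0, _, _, _, ret => ret
  | fuel+1, f0, f1, found, ret =>
    let f3 := PySem.Int.mod (f1 * num + f0) dd
    let ret' := if f3 > ret then f3 else ret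
    let n : Int × Int := (f1, f3)
    if found.contains n then ret'
    else pvLoopA num dd fuel f1 f3 (found.insert n) ret'

def GetRMAX (num : Int) : Int :=
  let f0 : Int := 2
  let f1 : Int := 2 * num
  -- Python's `found = set(tuple((f0,f1)))` is a set holding the two INTS 2 and 2*num; the loop only
  -- ever tests PAIRS `n = (f0, f1)` for membership, and a tuple never equals an int, so as a set of
  -- pairs the start value is exactly the empty set.  (The set is used for MEMBERSHIP only, never
  -- iterated, so a hash set is an exact model of Python's `set` here.)
  let found : Std.HashSet (Int × Int) := ∅
  let dd := num * num
  let ret := f1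
  pvLoopA num dd (2 * num.natAbs + 10) f0 f1 found ret

-- ===== PORT B =====
def GetRMAX_alt (num : Int) : Int :=
  if PySem.Int.mod num 2 ≠ 0 then max 2 (num * (num - 1))
  else max 2 (num * (num - 2))

-- ===== PRECONDITION & SPEC =====
-- Pre_ restricts to the problem's natural domain num ≥ 1: A raises ZeroDivisionError at num = 0
-- (`% dd` with dd = 0), and negative num are outside the natural domain of the max-remainder problem.
def Pre_GetRMAX (num : Int) : Prop := 1 ≤ num
instance (num : Int) : Decidable (Pre_GetRMAX num) := by unfold Pre_GetRMAX; infer_instance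
def pvWitness_GetRMAX : Int := (3)

-- at num = 2 A returns 4, its unreduced initial value 2*num, which is not even a remainder mod
-- num^2 = 4; B returns 2, the true maximum of (num-1)^n + (num+1)^n mod num^2.
def D_GetRMAX (num : Int) : Prop := num = 2
instance (num : Int) : Decidable (D_GetRMAX num) := by unfold D_GetRMAX; infer_instance

def Spec_GetRMAX (num : Int) (out : Int) : Prop := ¬ D_GetRMAX num → out = GetRMAX_alt num
instance (num : Int) (out : Int) : Decidable (Spec_GetRMAX num out) := by unfold Spec_GetRMAX; infer_instance

def pvDiffWitness_GetRMAX : Int := (2)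
def pvDiffWitnessOut_GetRMAX : Int × Int := (4, 2)

-- ===== CLAIM (what is proved, stated in full; the proofs are below) =====
def Claim_unchanged_GetRMAX : Prop := ∀ (num : Int), Dom_GetRMAX num → Pre_GetRMAX num → Spec_GetRMAX num (GetRMAX num)
def Claim_changed_GetRMAX : Prop := Dom_GetRMAX (pvDiffWitness_GetRMAX) ∧ Pre_GetRMAX (pvDiffWitness_GetRMAX) ∧ D_GetRMAX (pvDiffWitness_GetRMAX) ∧ GetRMAX (pvDiffWitness_GetRMAX) = pvDiffWitnessOut_GetRMAX.1 ∧ GetRMAX_alt (pvDiffWitness_GetRMAX) = pvDiffWitnessOut_GetRMAX.2 ∧ pvDiffWitnessOut_GetRMAX.1 ≠ pvDiffWitnessOut_GetRMAX.2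
def Claim_exact_GetRMAX : Prop := ∀ (num : Int), Dom_GetRMAX num → Pre_GetRMAX num → D_GetRMAX num → GetRMAX num ≠ GetRMAX_alt num

-- ===== LEMMAS AND PROOFS =====

def pvC (num k : Int) : Int := (2 * k * num) % (num * num)
def pvQ (num : Int) : Int := if 2 ∣ num then |num| / 2 else |num|
def pvM (num : Int) : Int := if 2 ∣ num then |num| * (|num| - 2) else |num| * (|num| - 1)

lemma pvC_eq_iff (num j k : Int) (h : num ≠ 0) :
    pvC num j = pvC num k ↔ pvQ num ∣ (j - k) := by
  set m := |num| with hm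
  have hm0 : m ≠ 0 := by simpa [hm] using h
  have hcase : num = m ∨ num = -m := by rcases abs_choice num with hc | hc <;> omega
  have h1 : pvC num j = pvC num k ↔ (num*num) ∣ (2*j*num - 2*k*num) := by
    unfold pvC
    rw [Int.emod_eq_emod_iff_emod_sub_eq_zero, PySem.Int.emod_eq_zero_iff_dvd]
  have h2 : (num*num) ∣ (2*j*num - 2*k*num) ↔ m ∣ 2*(j-k) := by
    rcases hcase with hc | hc
    · rw [show num*num = m*m from by rw [hc],
         show 2*j*num - 2*k*num = (2*(j-k))*m from by rw [hc]; ring,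
         mul_dvd_mul_iff_right hm0]
    · rw [show num*num = m*m from by rw [hc]; ring,
         show 2*j*num - 2*k*num = (-(2*(j-k)))*m from by rw [hc]; ring,
         mul_dvd_mul_iff_right hm0, dvd_neg]
  rw [h1, h2]
  unfold pvQ
  rw [← hm]
  split_ifs with hdvd
  · have h2m : 2 ∣ m := (dvd_abs 2 num).mpr hdvd
    rcases h2m with ⟨s, hs⟩
    rw [hs, Int.mul_ediv_cancel_left _ (by norm_num : (2:Int) ≠ 0),
       mul_dvd_mul_iff_left (by norm_num : (2:Int) ≠ 0)]
  · have h2m : ¬ (2:Int) ∣ m := fun hh => hdvd ((dvd_abs 2 num).mp hh)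
    constructor
    · intro hd
      exact (((Int.prime_two.coprime_iff_not_dvd).mpr h2m).symm).dvd_of_dvd_mul_left hd
    · intro hd; exact hd.mul_left 2

lemma pvC_bounds (num k : Int) (h : num ≠ 0) : 0 ≤ pvC num k ∧ pvC num k < num * num :=
  ⟨Int.emod_nonneg _ (mul_self_pos.mpr h).ne', Int.emod_lt_of_pos _ (mul_self_pos.mpr h)⟩

-- c k is a multiple of m (odd num) resp. 2m (even num), and so is num*num
lemma pvC_dvd (num k : Int) (h : num ≠ 0) :
    (if 2 ∣ num then 2 * |num| else |num|) ∣ pvC num k ∧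
    (if 2 ∣ num then 2 * |num| else |num|) ∣ num * num := by
  have habs : |num| ∣ num := (abs_dvd _ _).mpr dvd_rfl
  have hsq : |num| * |num| = num * num := abs_mul_abs_self num
  have hg1 : (if 2 ∣ num then 2 * |num| else |num|) ∣ 2 * k * num := by
    split_ifs with hd
    · exact dvd_trans (mul_dvd_mul_left 2 habs) ⟨k, by ring⟩
    · exact (habs.mul_left (2 * k))
  have hg2 : (if 2 ∣ num then 2 * |num| else |num|) ∣ num * num := by
    split_ifs with hd
    · have h2m : 2 ∣ |num| := (dvd_abs 2 num).mpr hd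
      rcases h2m with ⟨s, hs⟩
      exact ⟨s, by linear_combination |num| * hs - hsq⟩
    · exact ⟨|num|, hsq.symm⟩
  refine ⟨?_, hg2⟩
  unfold pvC
  rw [Int.emod_def]
  exact dvd_sub hg1 (hg2.mul_right _)

lemma pvC_ne_two (num k : Int) (h2 : 2 ≤ |num|) : pvC num k ≠ 2 := by
  have h : num ≠ 0 := by rintro rfl; simp at h2
  intro hc
  have hd := (pvC_dvd num k h).1
  rw [hc] at hd
  split_ifs at hd with hpar
  · have := Int.le_of_dvd (by norm_num) hd; omega
  · have := Int.le_of_dvd (by norm_num) hd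
    have hm2 : |num| = 2 := by omega
    exact hpar ((dvd_abs 2 num).mp (hm2 ▸ dvd_rfl))

lemma pvM_eq (num : Int) : pvM num = num * num - (if 2 ∣ num then 2 * |num| else |num|) := by
  have hsq : |num| * |num| = num * num := abs_mul_abs_self num
  unfold pvM; split_ifs <;> [skip; skip] <;> rw [← hsq] <;> ring

lemma pvC_le_M (num k : Int) (h2 : 2 ≤ |num|) : pvC num k ≤ pvM num := by
  have h : num ≠ 0 := by rintro rfl; simp at h2
  obtain ⟨hd1, hd2⟩ := pvC_dvd num k h
  obtain ⟨hc0, hclt⟩ := pvC_bounds num k h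
  have hgpos : 0 < (if 2 ∣ num then 2 * |num| else |num|) := by split_ifs <;> omega
  have hsub : (if 2 ∣ num then 2 * |num| else |num|) ∣ (num * num - pvC num k) :=
    dvd_sub hd2 hd1
  have := Int.le_of_dvd (by omega) hsub
  rw [pvM_eq]; omega

lemma pvM_attained (num : Int) (h2 : 2 ≤ |num|) :
    ∃ k₀, 2 ≤ k₀ ∧ k₀ ≤ pvQ num + 1 ∧ pvC num k₀ = pvM num := by
  have h : num ≠ 0 := by rintro rfl; simp at h2
  have hq1 : 1 ≤ pvQ num := by
    unfold pvQ; split_ifs with hd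
    · rcases (dvd_abs 2 num).mpr hd with ⟨t, ht⟩; omega
    · omega
  -- first: some x with pvC num x = pvM num
  have hx : ∃ x, pvC num x = pvM num := by
    set m := |num| with hm
    have hcase : num = m ∨ num = -m := by rcases abs_choice num with hc | hc <;> omega
    have key : ∀ x t, 2 * x * num = pvM num + (num * num) * t → pvC num x = pvM num := by
      intro x t hxt
      have hM0 : 0 ≤ pvM num := by
        unfold pvM; split_ifs with hd
        · have : 2 ∣ m := (dvd_abs 2 num).mpr hd
          rcases this with ⟨s, hs⟩; nlinarith [hs]
        · nlinarith
      have hMlt : pvM num < num * num := by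
        have := pvM_eq num; split_ifs at this <;> omega
      unfold pvC
      rw [hxt, Int.add_mul_emod_self_left, Int.emod_eq_of_lt hM0 hMlt]
    by_cases hd : 2 ∣ num
    · have h2m : 2 ∣ m := (dvd_abs 2 num).mpr hd
      rcases h2m with ⟨s, hs⟩
      have hMv : pvM num = m * (m - 2) := by unfold pvM; rw [if_pos hd]
      rcases hcase with hc | hc
      · exact ⟨s - 1, key _ 0 (by rw [hMv, hc]; linear_combination (-m) * hs)⟩
      · exact ⟨1, key _ (-1) (by rw [hMv, hc]; ring)⟩
    · have h2m : ¬ (2:Int) ∣ m := fun hh => hd ((dvd_abs 2 num).mp hh)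
      obtain ⟨s, hs⟩ : ∃ s, m = 2 * s + 1 := ⟨m / 2, by omega⟩
      have hMv : pvM num = m * (m - 1) := by unfold pvM; rw [if_neg hd]
      rcases hcase with hc | hc
      · exact ⟨s, key _ 0 (by rw [hMv, hc]; linear_combination (-m) * hs)⟩
      · exact ⟨s + 1, key _ (-2) (by rw [hMv, hc]; linear_combination m * hs)⟩
  rcases hx with ⟨x, hxM⟩
  refine ⟨2 + (x - 2) % pvQ num, ?_, ?_, ?_⟩
  · have := Int.emod_nonneg (x - 2) (by omega : pvQ num ≠ 0); omega
  · have := Int.emod_lt_of_pos (x - 2) (by omega : 0 < pvQ num); omega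
  · rw [← hxM]
    rw [pvC_eq_iff _ _ _ h]
    refine ⟨-((x - 2) / pvQ num), ?_⟩
    rw [Int.emod_def]; ring

lemma pvC_eq_twonum_iff (num k : Int) (h2 : 2 ≤ |num|) :
    pvC num k = 2 * num ↔ 3 ≤ num ∧ pvQ num ∣ (k - 1) := by
  have h : num ≠ 0 := by rintro rfl; simp at h2
  have hc1 : 3 ≤ num → pvC num 1 = 2 * num := by
    intro h3
    unfold pvC
    rw [show 2 * 1 * num = 2 * num from by ring]
    exact Int.emod_eq_of_lt (by omega) (by nlinarith)
  constructor
  · intro hck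
    obtain ⟨hc0, hclt⟩ := pvC_bounds num k h
    have h3 : 3 ≤ num := by
      rcases abs_cases num with ⟨he, _⟩ | ⟨he, _⟩
      · nlinarith
      · nlinarith
    refine ⟨h3, ?_⟩
    have : pvC num k = pvC num 1 := by rw [hck, hc1 h3]
    exact (pvC_eq_iff num k 1 h).mp this
  · rintro ⟨h3, hdv⟩
    rw [← hc1 h3]
    exact (pvC_eq_iff num k 1 h).mpr hdv

lemma pvLoopA_succ (num dd : Int) (fuel : Nat) (f0 f1 : Int)
    (found : Std.HashSet (Int × Int)) (ret : Int) :
    pvLoopA num dd (fuel+1) f0 f1 found ret =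
      (if found.contains (f1, PySem.Int.mod (f1 * num + f0) dd) then
        (if PySem.Int.mod (f1 * num + f0) dd > ret then PySem.Int.mod (f1 * num + f0) dd else ret)
      else pvLoopA num dd fuel f1 (PySem.Int.mod (f1 * num + f0) dd)
        (found.insert (f1, PySem.Int.mod (f1 * num + f0) dd))
        (if PySem.Int.mod (f1 * num + f0) dd > ret then PySem.Int.mod (f1 * num + f0) dd else ret)) := rfl

lemma pv_dd_big (num : Int) (h2 : 2 ≤ |num|) : 4 ≤ num * num := by
  have := abs_mul_abs_self num; nlinarith [abs_nonneg num]

lemma pv_emod_mul_add (x c b dd : Int) :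
    (x % dd * c + b) % dd = (x * c + b) % dd := by
  rw [Int.add_emod, Int.mul_emod, Int.emod_emod_of_dvd _ dvd_rfl, ← Int.mul_emod, ← Int.add_emod]

lemma pv_step1 (num k : Int) (h2 : 2 ≤ |num|) :
    PySem.Int.mod (pvC num k * num + 2) (num * num) = 2 := by
  have h : num ≠ 0 := by rintro rfl; simp at h2
  rw [PySem.Int.mod_eq_emod_of_pos (mul_self_pos.mpr h)]
  unfold pvC
  rw [pv_emod_mul_add,
     show 2 * k * num * num + 2 = 2 + num * num * (2 * k) from by ring,
     Int.add_mul_emod_self_left,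
     Int.emod_eq_of_lt (by norm_num) (by linarith [pv_dd_big num h2])]

lemma pv_step2 (num k : Int) (h : num ≠ 0) :
    PySem.Int.mod (2 * num + pvC num k) (num * num) = pvC num (k + 1) := by
  rw [PySem.Int.mod_eq_emod_of_pos (mul_self_pos.mpr h),
     show 2 * num + pvC num k = pvC num k * 1 + 2 * num from by ring]
  unfold pvC
  rw [pv_emod_mul_add]
  congr 1; ring

def pvMemInv (num k : Int) (found : Std.HashSet (Int × Int)) : Prop :=
  ∀ p : Int × Int, p ∈ found ↔ p = (2 * num, 2) ∨
    (∃ j, 2 ≤ j ∧ j ≤ k ∧ p = (2, pvC num j)) ∨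
    (∃ j, 2 ≤ j ∧ j ≤ k - 1 ∧ p = (pvC num j, 2))

-- at break time the accumulator is the closed-form maximum
lemma pv_ret_eq (num : Int) (h2 : 2 ≤ |num|) (k ret : Int) (hk : pvQ num + 1 ≤ k)
    (hbnd : 2 * num ≤ ret ∧ 2 ≤ ret ∧ (∀ j, 2 ≤ j → j ≤ k → pvC num j ≤ ret))
    (hid : ret = 2 * num ∨ ret = 2 ∨ ∃ j, 2 ≤ j ∧ j ≤ k ∧ ret = pvC num j) :
    ret = max (max (2 * num) 2) (pvM num) := by
  obtain ⟨k₀, hk1, hk2, hkM⟩ := pvM_attained num h2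
  apply le_antisymm
  · rcases hid with h | h | ⟨j, _, _, h⟩
    · exact h.le.trans (le_trans (le_max_left _ _) (le_max_left _ _))
    · exact h.le.trans (le_trans (le_max_right _ _) (le_max_left _ _))
    · exact h.le.trans ((pvC_le_M num j h2).trans (le_max_right _ _))
  · exact max_le (max_le hbnd.1 hbnd.2.1) (hkM ▸ hbnd.2.2 k₀ hk1 (by omega))

lemma pv_contains_false {s : Std.HashSet (Int × Int)} {x : Int × Int} (h : x ∉ s) :
    s.contains x = false := by
  rw [← Bool.not_eq_true, ← Std.HashSet.mem_iff_contains]; exact h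

lemma pv_contains_true {s : Std.HashSet (Int × Int)} {x : Int × Int} (h : x ∈ s) :
    s.contains x = true := Std.HashSet.mem_iff_contains.mp h

lemma pv_mem_insert (s : Std.HashSet (Int × Int)) (x y : Int × Int) :
    y ∈ s.insert x ↔ y ∈ s ∨ y = x := by
  rw [Std.HashSet.mem_insert, beq_iff_eq, eq_comm]; tauto

lemma pvLoop_main (num : Int) (h2 : 2 ≤ |num|) :
    ∀ (r : Nat) (k : Int), 2 ≤ k → k + r = pvQ num + 1 →
    ∀ (found : Std.HashSet (Int × Int)) (ret : Int) (fuel : Nat), 2 * r + 3 ≤ fuel →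
    pvMemInv num k found →
    (2 * num ≤ ret ∧ 2 ≤ ret ∧ (∀ j, 2 ≤ j → j ≤ k → pvC num j ≤ ret)) →
    (ret = 2 * num ∨ ret = 2 ∨ ∃ j, 2 ≤ j ∧ j ≤ k ∧ ret = pvC num j) →
    pvLoopA num (num * num) fuel 2 (pvC num k) found ret = max (max (2 * num) 2) (pvM num) := by
  have h0 : num ≠ 0 := by rintro rfl; simp at h2
  have hq1 : 1 ≤ pvQ num := by
    unfold pvQ; split_ifs with hd
    · rcases (dvd_abs 2 num).mpr hd with ⟨t, ht⟩; omega
    · omega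
  intro r
  induction r with
  | zero =>
    intro k hk2 hkr found ret fuel hfuel hmem hbnd hid
    have hkq : k = pvQ num + 1 := by push_cast at hkr; omega
    obtain ⟨f, rfl⟩ : ∃ f, fuel = f + 1 + 1 := ⟨fuel - 2, by omega⟩
    rw [pvLoopA_succ, pv_step1 num k h2, if_neg (by omega : ¬ (2:Int) > ret)]
    by_cases h3 : 3 ≤ num
    · have hck : pvC num k = 2 * num :=
        (pvC_eq_twonum_iff num k h2).mpr ⟨h3, by rw [hkq]; exact ⟨1, by ring⟩⟩
      rw [pv_contains_true (by rw [hck]; exact (hmem _).mpr (Or.inl rfl))]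
      exact pv_ret_eq num h2 k ret (by omega) hbnd hid
    · have hnotmem : (pvC num k, 2) ∉ found := by
        intro hmm
        rcases (hmem _).mp hmm with he | ⟨j, hj1, hj2, he⟩ | ⟨j, hj1, hj2, he⟩ <;>
          rw [Prod.mk.injEq] at he
        · exact h3 ((pvC_eq_twonum_iff num k h2).mp he.1).1
        · exact pvC_ne_two num k h2 he.1
        · have := Int.le_of_dvd (by omega) ((pvC_eq_iff num k j h0).mp he.1); omega
      rw [pv_contains_false hnotmem, pvLoopA_succ, pv_step2 num k h0]
      have hc2 : pvC num (k+1) = pvC num 2 := by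
        rw [pvC_eq_iff num _ _ h0, hkq]; exact ⟨1, by ring⟩
      have hle : pvC num (k+1) ≤ ret := hc2 ▸ hbnd.2.2 2 le_rfl hk2
      rw [if_neg (by omega : ¬ pvC num (k+1) > ret),
        pv_contains_true ((pv_mem_insert _ _ _).mpr (Or.inl
          ((hmem _).mpr (Or.inr (Or.inl ⟨2, le_rfl, hk2, by rw [hc2]⟩)))))]
      exact pv_ret_eq num h2 k ret (by omega) hbnd hid
  | succ r ih =>
    intro k hk2 hkr found ret fuel hfuel hmem hbnd hid
    have hkle : k ≤ pvQ num := by push_cast at hkr; omega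
    obtain ⟨f, rfl⟩ : ∃ f, fuel = f + 1 + 1 := ⟨fuel - 2, by omega⟩
    rw [pvLoopA_succ, pv_step1 num k h2, if_neg (by omega : ¬ (2:Int) > ret)]
    have hnotmem : (pvC num k, 2) ∉ found := by
      intro hmm
      rcases (hmem _).mp hmm with he | ⟨j, hj1, hj2, he⟩ | ⟨j, hj1, hj2, he⟩ <;>
        rw [Prod.mk.injEq] at he
      · obtain ⟨h3, hdv⟩ := (pvC_eq_twonum_iff num k h2).mp he.1
        have := Int.le_of_dvd (by omega) hdv; omega
      · exact pvC_ne_two num k h2 he.1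
      · have := Int.le_of_dvd (by omega) ((pvC_eq_iff num k j h0).mp he.1); omega
    rw [pv_contains_false hnotmem, pvLoopA_succ, pv_step2 num k h0]
    have hnotmem2 : (2, pvC num (k+1)) ∉ found.insert (pvC num k, 2) := by
      intro hmm
      rcases (pv_mem_insert _ _ _).mp hmm with hmm | he
      · rcases (hmem _).mp hmm with he | ⟨j, hj1, hj2, he⟩ | ⟨j, hj1, hj2, he⟩ <;>
          rw [Prod.mk.injEq] at he
        · exact pvC_ne_two num (k+1) h2 he.2
        · have := Int.le_of_dvd (by omega) ((pvC_eq_iff num (k+1) j h0).mp he.2); omega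
        · exact pvC_ne_two num j h2 he.1.symm
      · rw [Prod.mk.injEq] at he
        exact pvC_ne_two num k h2 he.1.symm
    rw [pv_contains_false hnotmem2]
    refine ih (k+1) (by omega) (by push_cast at hkr ⊢; omega) _ _ f (by omega) ?_ ?_ ?_
    · intro p
      rw [pv_mem_insert, pv_mem_insert, hmem p]
      constructor
      · intro hp
        rcases hp with (hp | rfl) | rfl
        · rcases hp with h | ⟨j, hj1, hj2, rfl⟩ | ⟨j, hj1, hj2, rfl⟩
          · exact Or.inl h
          · exact Or.inr (Or.inl ⟨j, hj1, by omega, rfl⟩)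
          · exact Or.inr (Or.inr ⟨j, hj1, by omega, rfl⟩)
        · exact Or.inr (Or.inr ⟨k, hk2, by omega, rfl⟩)
        · exact Or.inr (Or.inl ⟨k+1, by omega, le_rfl, rfl⟩)
      · intro hp
        rcases hp with h | ⟨j, hj1, hj2, rfl⟩ | ⟨j, hj1, hj2, rfl⟩
        · exact Or.inl (Or.inl (Or.inl h))
        · rcases eq_or_lt_of_le hj2 with rfl | hlt
          · exact Or.inr rfl
          · exact Or.inl (Or.inl (Or.inr (Or.inl ⟨j, hj1, by omega, rfl⟩)))
        · rcases eq_or_lt_of_le (by omega : j ≤ k) with rfl | hlt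
          · exact Or.inl (Or.inr rfl)
          · exact Or.inl (Or.inl (Or.inr (Or.inr ⟨j, hj1, by omega, rfl⟩)))
    · refine ⟨?_, ?_, ?_⟩
      · have := hbnd.1; split_ifs <;> omega
      · have := hbnd.2.1; split_ifs <;> omega
      · intro j hj1 hj2
        rcases eq_or_lt_of_le hj2 with rfl | hlt
        · split_ifs <;> omega
        · have := hbnd.2.2 j hj1 (by omega); split_ifs <;> omega
    · split_ifs with hgt
      · exact Or.inr (Or.inr ⟨k+1, by omega, le_rfl, rfl⟩)
      · rcases hid with h | h | ⟨j, hj1, hj2, h⟩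
        · exact Or.inl h
        · exact Or.inr (Or.inl h)
        · exact Or.inr (Or.inr ⟨j, hj1, by omega, h⟩)

lemma pv_main (num : Int) (h2 : 2 ≤ |num|) :
    GetRMAX num = max (max (2 * num) 2) (pvM num) := by
  have h0 : num ≠ 0 := by rintro rfl; simp at h2
  have hq1 : 1 ≤ pvQ num := by
    unfold pvQ; split_ifs with hd
    · rcases (dvd_abs 2 num).mpr hd with ⟨t, ht⟩; omega
    · omega
  have hqle : pvQ num ≤ |num| := by unfold pvQ; split_ifs <;> omega
  have hdd4 : 4 ≤ num * num := pv_dd_big num h2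
  show pvLoopA num (num * num) (2 * num.natAbs + 10) 2 (2 * num) ∅ (2 * num)
      = max (max (2 * num) 2) (pvM num)
  obtain ⟨f, hf⟩ : ∃ f, 2 * num.natAbs + 10 = f + 1 + 1 := ⟨2 * num.natAbs + 8, by omega⟩
  rw [hf, pvLoopA_succ]
  have e1 : PySem.Int.mod (2 * num * num + 2) (num * num) = 2 := by
    rw [PySem.Int.mod_eq_emod_of_pos (mul_self_pos.mpr h0),
       show 2 * num * num + 2 = 2 + num * num * 2 from by ring,
       Int.add_mul_emod_self_left, Int.emod_eq_of_lt (by norm_num) (by omega)]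
  rw [e1, pv_contains_false (Std.HashSet.not_mem_empty)]
  rw [pvLoopA_succ]
  have e2 : PySem.Int.mod (2 * num + 2 * num) (num * num) = pvC num 2 := by
    rw [PySem.Int.mod_eq_emod_of_pos (mul_self_pos.mpr h0)]
    unfold pvC; congr 1; ring
  rw [e2]
  have hne2 : pvC num 2 ≠ 2 := pvC_ne_two num 2 h2
  rw [pv_contains_false (by
    intro hmm
    rcases (pv_mem_insert _ _ _).mp hmm with hmm | he
    · exact Std.HashSet.not_mem_empty hmm
    · rw [Prod.mk.injEq] at he; exact hne2 he.2)]
  have htn : ((pvQ num - 1).toNat : Int) = pvQ num - 1 := Int.toNat_of_nonneg (by omega)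
  have hna : (num.natAbs : Int) = |num| := (Int.abs_eq_natAbs num).symm
  apply pvLoop_main num h2 (pvQ num - 1).toNat 2 le_rfl (by omega) _ _ f (by omega)
  · intro p
    rw [pv_mem_insert, pv_mem_insert]
    constructor
    · rintro ((h | rfl) | rfl)
      · exact absurd h Std.HashSet.not_mem_empty
      · exact Or.inl rfl
      · exact Or.inr (Or.inl ⟨2, le_rfl, le_rfl, rfl⟩)
    · rintro (rfl | ⟨j, hj1, hj2, rfl⟩ | ⟨j, hj1, hj2, rfl⟩)
      · exact Or.inl (Or.inr rfl)
      · obtain rfl : j = 2 := le_antisymm hj2 hj1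
        exact Or.inr rfl
      · omega
  · refine ⟨?_, ?_, ?_⟩
    · split_ifs <;> omega
    · split_ifs <;> omega
    · intro j hj1 hj2
      obtain rfl : j = 2 := le_antisymm hj2 hj1
      split_ifs <;> omega
  · split_ifs <;>
      first
        | exact Or.inl rfl
        | exact Or.inr (Or.inl rfl)
        | exact Or.inr (Or.inr ⟨2, le_rfl, le_rfl, rfl⟩)

-- B's closed form coincides with the loop's closed form on num ≥ 3
lemma pv_alt_pos (num : Int) (h3 : 3 ≤ num) :
    GetRMAX_alt num = max (max (2 * num) 2) (pvM num) := by
  have habs : |num| = num := abs_of_pos (by omega)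
  unfold GetRMAX_alt pvM
  rw [habs]
  by_cases hd : 2 ∣ num
  · have h4 : 4 ≤ num := by rcases hd with ⟨s, hs⟩; omega
    have hP1 : (2:Int) ≤ num * (num - 2) := by nlinarith
    have hP2 : 2 * num ≤ num * (num - 2) := by nlinarith
    rw [if_neg (by
        simp only [ne_eq, not_not]
        exact (PySem.Int.mod_eq_zero_iff_dvd _ _).mpr hd),
       if_pos hd, max_eq_right hP1, max_eq_right (max_le hP2 hP1)]
  · have hP1 : (2:Int) ≤ num * (num - 1) := by nlinarith
    have hP2 : 2 * num ≤ num * (num - 1) := by nlinarith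
    rw [if_pos (fun hzz => hd ((PySem.Int.mod_eq_zero_iff_dvd _ _).mp hzz)),
       if_neg hd, max_eq_right hP1, max_eq_right (max_le hP2 hP1)]

lemma pv_mod_one (x : Int) : PySem.Int.mod x 1 = 0 := by
  rw [PySem.Int.mod_eq_emod_of_pos one_pos, Int.emod_one]

lemma pv_one : GetRMAX 1 = 2 := by
  show pvLoopA 1 1 12 2 2 ∅ 2 = 2
  rw [show (12:Nat) = 11+1 from rfl, pvLoopA_succ, pv_mod_one,
     if_neg (by norm_num : ¬ (0:Int) > 2), pv_contains_false (Std.HashSet.not_mem_empty),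
     show (11:Nat) = 10+1 from rfl, pvLoopA_succ, pv_mod_one,
     if_neg (by norm_num : ¬ (0:Int) > 2),
     pv_contains_false (by
       intro hmm
       rcases (pv_mem_insert _ _ _).mp hmm with h | h
       · exact Std.HashSet.not_mem_empty h
       · exact absurd h (by decide)),
     show (10:Nat) = 9+1 from rfl, pvLoopA_succ, pv_mod_one,
     if_neg (by norm_num : ¬ (0:Int) > 2),
     pv_contains_true ((pv_mem_insert _ _ _).mpr (Or.inr rfl))]
  simp

lemma pv_mod_lit (a b : Int) (ha : 0 ≤ a) (hab : a < b) (k : Int)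
    (_hk : 0 ≤ k) : PySem.Int.mod (a + b * k) b = a := by
  rw [PySem.Int.mod_eq_emod_of_pos (by omega), Int.add_mul_emod_self_left,
     Int.emod_eq_of_lt ha hab]

lemma pv_two : GetRMAX 2 = 4 := by
  show pvLoopA 2 4 14 2 4 ∅ 4 = 4
  have m1 : PySem.Int.mod ((4:Int) * 2 + 2) 4 = 2 := by
    rw [show ((4:Int) * 2 + 2) = 2 + 4 * 2 from by ring]
    exact pv_mod_lit 2 4 (by norm_num) (by norm_num) 2 (by norm_num)
  have m2 : PySem.Int.mod ((2:Int) * 2 + 4) 4 = 0 := by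
    rw [show ((2:Int) * 2 + 4) = 0 + 4 * 2 from by ring]
    exact pv_mod_lit 0 4 (by norm_num) (by norm_num) 2 (by norm_num)
  have m3 : PySem.Int.mod ((0:Int) * 2 + 2) 4 = 2 := by
    rw [show ((0:Int) * 2 + 2) = 2 + 4 * 0 from by ring]
    exact pv_mod_lit 2 4 (by norm_num) (by norm_num) 0 (by norm_num)
  have m4 : PySem.Int.mod ((2:Int) * 2 + 0) 4 = 0 := by
    rw [show ((2:Int) * 2 + 0) = 0 + 4 * 1 from by ring]
    exact pv_mod_lit 0 4 (by norm_num) (by norm_num) 1 (by norm_num)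
  rw [show (14:Nat) = 13+1 from rfl, pvLoopA_succ, m1,
     if_neg (by norm_num : ¬ (2:Int) > 4), pv_contains_false (Std.HashSet.not_mem_empty),
     show (13:Nat) = 12+1 from rfl, pvLoopA_succ, m2,
     if_neg (by norm_num : ¬ (0:Int) > 4),
     pv_contains_false (by
       intro hmm
       rcases (pv_mem_insert _ _ _).mp hmm with h | h
       · exact Std.HashSet.not_mem_empty h
       · exact absurd h (by decide)),
     show (12:Nat) = 11+1 from rfl, pvLoopA_succ, m3,
     if_neg (by norm_num : ¬ (2:Int) > 4),
     pv_contains_false (by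
       intro hmm
       rcases (pv_mem_insert _ _ _).mp hmm with h | h
       · rcases (pv_mem_insert _ _ _).mp h with h | h
         · exact Std.HashSet.not_mem_empty h
         · exact absurd h (by decide)
       · exact absurd h (by decide)),
     show (11:Nat) = 10+1 from rfl, pvLoopA_succ, m4,
     if_neg (by norm_num : ¬ (0:Int) > 4),
     pv_contains_true (show ((2:Int), (0:Int)) ∈ ((∅ : Std.HashSet (Int × Int)).insert (4, 2) |>.insert (2, 0) |>.insert (0, 2)) from
       (pv_mem_insert _ _ _).mpr (Or.inl ((pv_mem_insert _ _ _).mpr (Or.inr rfl))))]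
  simp

-- ===== VERDICT (by name: the statement is the Claim_ definition above) =====
theorem GetRMAX_spec : Claim_unchanged_GetRMAX := by
  intro num _ hpre hnd
  unfold Pre_GetRMAX at hpre
  unfold D_GetRMAX at hnd
  by_cases h3 : 3 ≤ num
  · rw [pv_main num (by rw [abs_of_pos (by omega)]; omega), pv_alt_pos num h3]
  · obtain rfl : num = 1 := by omega
    rw [pv_one]; decide

theorem GetRMAX_changed : Claim_changed_GetRMAX := by
  unfold Claim_changed_GetRMAX
  refine ⟨by decide, by decide, by decide, pv_two, by decide, by decide⟩

theorem GetRMAX_tight : Claim_exact_GetRMAX := by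
  intro num _ _ hd
  unfold D_GetRMAX at hd
  subst hd
  rw [pv_two]
  decide
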